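-- pv_equiv track=rewrite | github.com/DevXDividends/K-Map-visualiser | backend/app.py | combine_pair
-- ===== SOURCE A (Python) =====
-- def combine_pair(a, b):
--     diff = 0
--     out = []
--     for x, y in zip(a, b):
--         if x != y:
--             diff += 1
--             out.append('-')
--         else:
--             out.append(x)
--         if diff > 1:
--             return None
--     return ''.join(out) if diff == 1 else None
-- ===== SOURCE B (Python) =====
-- def combine_pair(a, b):
--     pairs = list(zip(a, b))
--     diff_idx = [i for i, (x, y) in enumerate(pairs) if x != y]
--     if len(diff_idx) != 1:
--         return None
--     prefix = [x for x, _ in pairs]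
--     prefix[diff_idx[0]] = '-'
--     return ''.join(prefix)
-- ===== Notes on version B (the rewrite author's own statement) =====
-- stated objective: alternative
-- what changed: Replaces A's fused single loop with counter, early-exit and incremental output building by a two-phase index-then-build: first collect the list of differing positions over zip(a,b), then, only if exactly one, build the output by replacing that single position in the zip-truncated prefix of a.
import Mathlib
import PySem

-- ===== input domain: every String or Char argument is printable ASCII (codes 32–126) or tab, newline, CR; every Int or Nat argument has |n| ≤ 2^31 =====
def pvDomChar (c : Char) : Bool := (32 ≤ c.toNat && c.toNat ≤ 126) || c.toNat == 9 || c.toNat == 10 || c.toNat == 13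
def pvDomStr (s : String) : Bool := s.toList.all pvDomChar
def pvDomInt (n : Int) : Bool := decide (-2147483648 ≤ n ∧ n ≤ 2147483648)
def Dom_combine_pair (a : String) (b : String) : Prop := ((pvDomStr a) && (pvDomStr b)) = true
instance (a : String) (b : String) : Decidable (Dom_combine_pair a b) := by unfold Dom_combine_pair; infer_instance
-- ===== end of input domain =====

-- B replaces A's fused counting loop by a two-phase index-then-build pass ('alternative'); same return values.

-- ===== PORT A =====
-- A's loop: state (diff, out), '-' or x appended each step, early None as soon as diff exceeds 1, final check diff == 1.
def combineLoop : List (Char × Char) → Int → List Char → Option (List Char)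
  | [], diff, out => if diff = 1 then some out else none
  | (x, y) :: rest, diff, out =>
    if x != y then
      if diff + 1 > 1 then none else combineLoop rest (diff + 1) (out ++ ['-'])
    else
      if diff > 1 then none else combineLoop rest diff (out ++ [x])

def combine_pair (a : String) (b : String) : Option String :=
  (combineLoop (a.toList.zip b.toList) 0 []).map String.ofList

-- ===== PORT B =====
def combine_pair_alt (a : String) (b : String) : Option String :=
  let pairs := a.toList.zip b.toList
  let diffIdx := ((PySem.List.enumerate pairs 0).filter (fun e => e.2.1 != e.2.2)).map Prod.fst
  if diffIdx.length = 1 then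
    -- list assignment prefix[i] = '-' : i comes from enumerate, hence nonnegative and in range, = List.set
    some (String.ofList ((pairs.map Prod.fst).set (diffIdx.headD 0).toNat '-'))
  else none

-- ===== PRECONDITION & SPEC =====
def Spec_combine_pair (a : String) (b : String) (out : Option String) : Prop := out = combine_pair_alt a b
instance (a : String) (b : String) (out : Option String) : Decidable (Spec_combine_pair a b out) := by unfold Spec_combine_pair; infer_instance

-- ===== CLAIM (what is proved, stated in full; the proofs are below) =====
def Claim_equal_combine_pair : Prop := ∀ (a : String) (b : String), Dom_combine_pair a b → Spec_combine_pair a b (combine_pair a b)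

-- ===== LEMMAS AND PROOFS =====

def diffCount (ps : List (Char × Char)) : Nat := ps.countP (fun p => p.1 != p.2)
def repl (ps : List (Char × Char)) : List Char := ps.map (fun p => if p.1 != p.2 then '-' else p.1)
def idxsFrom (s : Int) (ps : List (Char × Char)) : List Int :=
  ((PySem.List.enumerate ps s).filter (fun e => e.2.1 != e.2.2)).map Prod.fst

lemma repl_cons_diff (x y : Char) (rest : List (Char × Char)) (h : (x != y) = true) :
    repl ((x, y) :: rest) = '-' :: repl rest := by
  have hxy : x ≠ y := by simpa using h
  simp [repl, hxy]

lemma repl_cons_eq (x y : Char) (rest : List (Char × Char)) (h : (x != y) = false) :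
    repl ((x, y) :: rest) = x :: repl rest := by
  have hxy : x = y := by simpa using h
  simp [repl, hxy]

lemma diffCount_cons_diff (x y : Char) (rest : List (Char × Char)) (h : (x != y) = true) :
    diffCount ((x, y) :: rest) = diffCount rest + 1 := by simp [diffCount, h]

lemma diffCount_cons_eq (x y : Char) (rest : List (Char × Char)) (h : (x != y) = false) :
    diffCount ((x, y) :: rest) = diffCount rest := by simp [diffCount, h]

lemma idxsFrom_cons (s : Int) (p : Char × Char) (rest : List (Char × Char)) :
    idxsFrom s (p :: rest) =
      if (p.1 != p.2) = true then s :: idxsFrom (s + 1) rest else idxsFrom (s + 1) rest := by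
  simp only [idxsFrom, PySem.List.enumerate_cons, List.filter_cons]
  split_ifs with h <;> simp

lemma combineLoop_eq (ps : List (Char × Char)) : ∀ (d : Int) (out : List Char),
    combineLoop ps d out = if d + (diffCount ps : Int) = 1 then some (out ++ repl ps) else none := by
  induction ps with
  | nil => intro d out; simp [combineLoop, diffCount, repl]
  | cons p rest ih =>
    intro d out
    obtain ⟨x, y⟩ := p
    by_cases h : (x != y) = true
    · rw [show combineLoop ((x, y) :: rest) d out =
          (if d + 1 > 1 then none else combineLoop rest (d + 1) (out ++ ['-'])) from by
        simp only [combineLoop, h, if_true]]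
      rw [repl_cons_diff x y rest h, diffCount_cons_diff x y rest h]
      by_cases hd : d + 1 > 1
      · rw [if_pos hd, if_neg (by push_cast; omega)]
      · rw [if_neg hd, ih]
        split_ifs with h1 h2
        · simp
        · exfalso; push_cast at h1 h2; omega
        · exfalso; push_cast at *; omega
        · rfl
    · have h' : (x != y) = false := by simpa using h
      rw [show combineLoop ((x, y) :: rest) d out =
          (if d > 1 then none else combineLoop rest d (out ++ [x])) from by
        simp only [combineLoop, h', Bool.false_eq_true, if_false]]
      rw [repl_cons_eq x y rest h', diffCount_cons_eq x y rest h']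
      by_cases hd : d > 1
      · rw [if_pos hd, if_neg (by omega)]
      · rw [if_neg hd, ih]
        split_ifs with h1
        · simp
        · rfl

lemma length_idxsFrom (ps : List (Char × Char)) : ∀ s, (idxsFrom s ps).length = diffCount ps := by
  induction ps with
  | nil => intro s; simp [idxsFrom, diffCount, PySem.List.enumerate_nil]
  | cons p rest ih =>
    intro s
    rw [idxsFrom_cons]
    by_cases h : (p.1 != p.2) = true
    · obtain ⟨x, y⟩ := p
      rw [if_pos h, diffCount_cons_diff x y rest h, List.length_cons, ih]
    · obtain ⟨x, y⟩ := p
      rw [if_neg h, diffCount_cons_eq x y rest (by simpa using h), ih]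

lemma mem_idxsFrom_le (ps : List (Char × Char)) : ∀ (s i : Int), i ∈ idxsFrom s ps → s ≤ i := by
  induction ps with
  | nil => intro s i h; simp [idxsFrom, PySem.List.enumerate_nil] at h
  | cons p rest ih =>
    intro s i h
    rw [idxsFrom_cons] at h
    by_cases hp : (p.1 != p.2) = true
    · rw [if_pos hp] at h
      rcases List.mem_cons.mp h with h | h
      · omega
      · have := ih (s + 1) i h; omega
    · rw [if_neg hp] at h
      have := ih (s + 1) i h; omega

lemma repl_of_no_diff (ps : List (Char × Char)) (h : diffCount ps = 0) :
    repl ps = ps.map Prod.fst := by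
  induction ps with
  | nil => simp [repl]
  | cons p rest ih =>
    obtain ⟨x, y⟩ := p
    have hp : (x != y) = false := by
      by_contra hc
      have hc' : (x != y) = true := by simpa using hc
      rw [diffCount_cons_diff x y rest hc'] at h; omega
    have hr : diffCount rest = 0 := by rw [diffCount_cons_eq x y rest hp] at h; exact h
    rw [repl_cons_eq x y rest hp, List.map_cons, ih hr]

lemma set_idxs_eq_repl (ps : List (Char × Char)) : ∀ (s : Int), 0 ≤ s →
    (idxsFrom s ps).length = 1 →
    (ps.map Prod.fst).set (((idxsFrom s ps).headD 0) - s).toNat '-' = repl ps := by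
  induction ps with
  | nil => intro s _ h; simp [idxsFrom, PySem.List.enumerate_nil] at h
  | cons p rest ih =>
    intro s hs h
    obtain ⟨x, y⟩ := p
    rw [idxsFrom_cons] at h ⊢
    by_cases hp : ((x, y).1 != (x, y).2) = true
    · rw [if_pos hp] at h ⊢
      have hrest : (idxsFrom (s + 1) rest).length = 0 := by
        simpa using Nat.succ_injective h
      have hc : diffCount rest = 0 := by rw [← length_idxsFrom rest (s + 1)]; exact hrest
      simp only [List.headD_cons, sub_self, Int.toNat_zero, List.map_cons, List.set_cons_zero]
      rw [repl_cons_diff x y rest hp, repl_of_no_diff rest hc]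
    · rw [if_neg hp] at h ⊢
      have hne : idxsFrom (s + 1) rest ≠ [] := by
        intro hn; rw [hn] at h; simp at h
      obtain ⟨i, tl, hit⟩ := List.exists_cons_of_ne_nil hne
      have hi : s + 1 ≤ i := mem_idxsFrom_le rest (s + 1) i (by rw [hit]; exact List.mem_cons_self)
      have hhead : ((idxsFrom (s + 1) rest).headD 0) = i := by rw [hit]; rfl
      have htn : (((idxsFrom (s + 1) rest).headD 0) - s).toNat
          = (((idxsFrom (s + 1) rest).headD 0) - (s + 1)).toNat + 1 := by rw [hhead]; omega
      rw [List.map_cons, htn, List.set_cons_succ,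
        repl_cons_eq x y rest (by simpa using hp), ih (s + 1) (by omega) h]

-- ===== VERDICT (by name: the statement is the Claim_ definition above) =====
theorem combine_pair_spec : Claim_equal_combine_pair := by
  intro a b _
  unfold Spec_combine_pair combine_pair combine_pair_alt
  set ps := a.toList.zip b.toList with hps
  rw [combineLoop_eq]
  have hlen : (((PySem.List.enumerate ps 0).filter (fun e => e.2.1 != e.2.2)).map Prod.fst).length
      = diffCount ps := length_idxsFrom ps 0
  by_cases hc : diffCount ps = 1
  · rw [if_pos (by rw [hc]; norm_num), if_pos (by rw [hlen, hc])]
    have hset := set_idxs_eq_repl ps 0 le_rfl (by rw [length_idxsFrom]; exact hc)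
    simp only [sub_zero] at hset
    simp only [idxsFrom] at hset
    rw [hset]
    simp
  · rw [if_neg (by omega), if_neg (by rw [hlen]; exact hc)]
    rfl
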